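-- pv_equiv track=rewrite | github.com/pypi-data/pypi-mirror-361 | packages/dicomdiff/dicomdiff-0.4.0.tar.gz/dicomdiff-0.4.0/dicomdiff/summary.py | analyze_tag_existence_patterns
-- ===== SOURCE A (Python) =====
-- from typing import List, Optional, Dict, Set, Tuple, Union
--
-- def analyze_tag_existence_patterns(tag, tag_existence) -> Dict:
--     patterns = {
--         "tag_only_in_source": False,
--         "tag_only_in_a": False,
--         "tag_only_in_b": False,
--         "tag_in_source_and_a": False,
--         "tag_in_source_and_b": False,
--     }
--
--     for _, existence_dict in tag_existence.get(tag, {}).items():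
--         source = existence_dict.get("source", False)
--         a = existence_dict.get("a", False)
--         b = existence_dict.get("b", False)
--
--         if source and not a and not b:
--             patterns["tag_only_in_source"] = True
--         if not source and a and not b:
--             patterns["tag_only_in_a"] = True
--         if not source and not a and b:
--             patterns["tag_only_in_b"] = True
--         if source and a:
--             patterns["tag_in_source_and_a"] = True
--         if source and b:
--             patterns["tag_in_source_and_b"] = True
--
--     return patterns
-- ===== SOURCE B (Python) =====
-- def analyze_tag_existence_patterns(tag, tag_existence) -> dict:
--     seen = set()
--     for existence_dict in tag_existence.get(tag, {}).values():
--         seen.add((existence_dict.get("source", False),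
--                   existence_dict.get("a", False),
--                   existence_dict.get("b", False)))
--     return {
--         "tag_only_in_source": (True, False, False) in seen,
--         "tag_only_in_a": (False, True, False) in seen,
--         "tag_only_in_b": (False, False, True) in seen,
--         "tag_in_source_and_a": any(s and a for (s, a, _) in seen),
--         "tag_in_source_and_b": any(s and b for (s, _, b) in seen),
--     }
-- ===== Notes on version B (the rewrite author's own statement) =====
-- stated objective: alternative
-- what changed: Instead of updating five flags with five ifs inside the loop, B makes one pass that only collects the distinct (source,a,b) boolean states into a set, and then derives all five pattern flags from that fixed-size set by membership / any checks.
import Mathlib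
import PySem

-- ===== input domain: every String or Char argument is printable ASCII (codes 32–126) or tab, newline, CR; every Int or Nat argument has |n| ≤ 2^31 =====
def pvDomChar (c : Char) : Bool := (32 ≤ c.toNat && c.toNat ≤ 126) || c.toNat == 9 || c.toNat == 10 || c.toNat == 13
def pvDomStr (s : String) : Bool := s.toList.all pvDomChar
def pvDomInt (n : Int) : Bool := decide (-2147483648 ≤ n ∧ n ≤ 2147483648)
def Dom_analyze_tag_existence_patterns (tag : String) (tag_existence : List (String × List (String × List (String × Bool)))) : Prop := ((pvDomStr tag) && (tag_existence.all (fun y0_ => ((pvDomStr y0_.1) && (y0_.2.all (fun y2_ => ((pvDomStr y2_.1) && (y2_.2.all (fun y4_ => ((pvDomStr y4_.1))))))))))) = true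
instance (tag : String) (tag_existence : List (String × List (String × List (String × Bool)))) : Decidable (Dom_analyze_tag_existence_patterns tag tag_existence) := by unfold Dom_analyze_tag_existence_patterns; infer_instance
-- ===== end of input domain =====

-- B collects the distinct (source, a, b) states in one pass and derives the five flags from that set afterwards; an alternative decomposition of the same O(n) task.

-- ===== PORT A =====
-- loop body of A: five independent ifs, each setting one flag of the patterns dict
def pvStepA (pats : PySem.Dict String Bool) (kv : String × List (String × Bool)) : PySem.Dict String Bool :=
  let source := (PySem.Dict.mk kv.2).getD "source" false
  let a := (PySem.Dict.mk kv.2).getD "a" false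
  let b := (PySem.Dict.mk kv.2).getD "b" false
  let pats := if source && !a && !b then pats.insert "tag_only_in_source" true else pats
  let pats := if !source && a && !b then pats.insert "tag_only_in_a" true else pats
  let pats := if !source && !a && b then pats.insert "tag_only_in_b" true else pats
  let pats := if source && a then pats.insert "tag_in_source_and_a" true else pats
  let pats := if source && b then pats.insert "tag_in_source_and_b" true else pats
  pats

def analyze_tag_existence_patterns (tag : String) (tag_existence : List (String × List (String × List (String × Bool)))) : List (String × Bool) :=
  let patterns : PySem.Dict String Bool := PySem.Dict.ofList
    [("tag_only_in_source", false), ("tag_only_in_a", false), ("tag_only_in_b", false),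
     ("tag_in_source_and_a", false), ("tag_in_source_and_b", false)]
  (((PySem.Dict.mk tag_existence).getD tag []).foldl pvStepA patterns).items

-- ===== PORT B =====
-- the (source, a, b) boolean state of one inner existence dict
def pvTriple (kv : String × List (String × Bool)) : Bool × Bool × Bool :=
  ((PySem.Dict.mk kv.2).getD "source" false,
   (PySem.Dict.mk kv.2).getD "a" false,
   (PySem.Dict.mk kv.2).getD "b" false)

def analyze_tag_existence_patterns_alt (tag : String) (tag_existence : List (String × List (String × List (String × Bool)))) : List (String × Bool) :=
  let seen : PySem.Set (Bool × Bool × Bool) :=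
    ((PySem.Dict.mk tag_existence).getD tag []).foldl
      (fun s kv => PySem.Set.add s (pvTriple kv)) PySem.Set.empty
  [("tag_only_in_source", PySem.Set.contains seen (true, false, false)),
   ("tag_only_in_a", PySem.Set.contains seen (false, true, false)),
   ("tag_only_in_b", PySem.Set.contains seen (false, false, true)),
   ("tag_in_source_and_a", seen.any (fun t => t.1 && t.2.1)),
   ("tag_in_source_and_b", seen.any (fun t => t.1 && t.2.2))]

-- ===== PRECONDITION & SPEC =====
def Spec_analyze_tag_existence_patterns (tag : String) (tag_existence : List (String × List (String × List (String × Bool)))) (out : List (String × Bool)) : Prop := out = analyze_tag_existence_patterns_alt tag tag_existence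
instance (tag : String) (tag_existence : List (String × List (String × List (String × Bool)))) (out : List (String × Bool)) : Decidable (Spec_analyze_tag_existence_patterns tag tag_existence out) := by unfold Spec_analyze_tag_existence_patterns; infer_instance

-- ===== CLAIM (what is proved, stated in full; the proofs are below) =====
def Claim_equal_analyze_tag_existence_patterns : Prop := ∀ (tag : String) (tag_existence : List (String × List (String × List (String × Bool)))), Dom_analyze_tag_existence_patterns tag tag_existence → Spec_analyze_tag_existence_patterns tag tag_existence (analyze_tag_existence_patterns tag tag_existence)


-- ===== LEMMAS AND PROOFS =====
theorem foldA_closed (xs : List (String × List (String × Bool))) (b1 b2 b3 b4 b5 : Bool) :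
    xs.foldl pvStepA (PySem.Dict.ofList
      [("tag_only_in_source", b1), ("tag_only_in_a", b2), ("tag_only_in_b", b3),
       ("tag_in_source_and_a", b4), ("tag_in_source_and_b", b5)]) =
    PySem.Dict.ofList
      [("tag_only_in_source", b1 || xs.any (fun kv => (pvTriple kv).1 && !(pvTriple kv).2.1 && !(pvTriple kv).2.2)),
       ("tag_only_in_a", b2 || xs.any (fun kv => !(pvTriple kv).1 && (pvTriple kv).2.1 && !(pvTriple kv).2.2)),
       ("tag_only_in_b", b3 || xs.any (fun kv => !(pvTriple kv).1 && !(pvTriple kv).2.1 && (pvTriple kv).2.2)),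
       ("tag_in_source_and_a", b4 || xs.any (fun kv => (pvTriple kv).1 && (pvTriple kv).2.1)),
       ("tag_in_source_and_b", b5 || xs.any (fun kv => (pvTriple kv).1 && (pvTriple kv).2.2))] := by
  induction xs generalizing b1 b2 b3 b4 b5 with
  | nil => simp
  | cons kv xs ih =>
    rw [List.foldl_cons]
    have hstep : pvStepA (PySem.Dict.ofList
      [("tag_only_in_source", b1), ("tag_only_in_a", b2), ("tag_only_in_b", b3),
       ("tag_in_source_and_a", b4), ("tag_in_source_and_b", b5)]) kv =
      PySem.Dict.ofList
      [("tag_only_in_source", b1 || ((pvTriple kv).1 && !(pvTriple kv).2.1 && !(pvTriple kv).2.2)),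
       ("tag_only_in_a", b2 || (!(pvTriple kv).1 && (pvTriple kv).2.1 && !(pvTriple kv).2.2)),
       ("tag_only_in_b", b3 || (!(pvTriple kv).1 && !(pvTriple kv).2.1 && (pvTriple kv).2.2)),
       ("tag_in_source_and_a", b4 || ((pvTriple kv).1 && (pvTriple kv).2.1)),
       ("tag_in_source_and_b", b5 || ((pvTriple kv).1 && (pvTriple kv).2.2))] := by
      show pvStepA _ kv = _
      simp only [pvStepA, pvTriple]
      cases (PySem.Dict.mk kv.2).getD "source" false <;>
        cases (PySem.Dict.mk kv.2).getD "a" false <;>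
          cases (PySem.Dict.mk kv.2).getD "b" false <;>
            cases b1 <;> cases b2 <;> cases b3 <;> cases b4 <;> cases b5 <;> rfl
    rw [hstep, ih]
    simp [Bool.or_assoc]

theorem any_add (s : PySem.Set (Bool × Bool × Bool)) (x : Bool × Bool × Bool)
    (p : Bool × Bool × Bool → Bool) :
    (PySem.Set.add s x).any p = (s.any p || p x) := by
  by_cases h : s.contains x
  · have hx : x ∈ s := by simpa using h
    simp only [PySem.Set.add, h, if_pos]
    cases hp : p x
    · simp
    · simp [List.any_of_mem hx hp]
  · have hx : x ∉ s := by simpa using h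
    simp [PySem.Set.add, hx]

theorem anyFold (xs : List (String × List (String × Bool))) (s : PySem.Set (Bool × Bool × Bool))
    (p : Bool × Bool × Bool → Bool) :
    (xs.foldl (fun s kv => PySem.Set.add s (pvTriple kv)) s).any p
      = (s.any p || xs.any (fun kv => p (pvTriple kv))) := by
  induction xs generalizing s with
  | nil => simp
  | cons kv xs ih => simp [ih, any_add, Bool.or_assoc]

theorem beq_triple_explicit (t : Bool × Bool × Bool) (u1 u2 u3 : Bool) :
    (t == (u1, u2, u3)) = ((t.1 == u1) && (t.2.1 == u2) && (t.2.2 == u3)) := by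
  obtain ⟨a, b, c⟩ := t
  cases a <;> cases b <;> cases c <;> cases u1 <;> cases u2 <;> cases u3 <;> rfl

theorem containsFold (xs : List (String × List (String × Bool)))
    (t : Bool × Bool × Bool) :
    PySem.Set.contains (xs.foldl (fun s kv => PySem.Set.add s (pvTriple kv)) PySem.Set.empty) t
      = xs.any (fun kv => pvTriple kv == t) := by
  have h := anyFold xs PySem.Set.empty (fun u => u == t)
  simp only [PySem.Set.empty, List.any_nil, Bool.false_or] at h
  rw [← h]
  exact Eq.symm (List.any_beq')

-- ===== VERDICT (by name: the statement is the Claim_ definition above) =====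
theorem analyze_tag_existence_patterns_spec : Claim_equal_analyze_tag_existence_patterns := by
  intro tag te _
  unfold Spec_analyze_tag_existence_patterns
  unfold analyze_tag_existence_patterns analyze_tag_existence_patterns_alt
  dsimp only
  generalize ((PySem.Dict.mk te).getD tag []) = xs
  rw [foldA_closed, containsFold, containsFold, containsFold]
  simp only [anyFold, PySem.Set.empty, List.any_nil, Bool.false_or, beq_triple_explicit]
  simp only [beq_true, beq_false]
  rfl
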